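-- pv_equiv track=rewrite | github.com/imruchisahu/TUF_Python_code | 12_Bit_Manipulation/02_Problems/04_Single_Number_III.py | singleNumber
-- ===== SOURCE A (Python) =====
-- def singleNumber(nums):
--     ans = []
--     mpp = {}
--     for num in nums:
--         mpp[num] = mpp.get(num, 0) + 1
--     for key, value in mpp.items():
--         if value == 1:
--             ans.append(key)
--     ans.sort()
--     return ans
-- ===== SOURCE B (Python) =====
-- def singleNumber(nums):
--     s = sorted(nums)
--     ans = []
--     i = 0
--     n = len(s)
--     while i < n:
--         j = i
--         while j < n and s[j] == s[i]:
--             j += 1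
--         if j - i == 1:
--             ans.append(s[i])
--         i = j
--     return ans
-- ===== Notes on version B (the rewrite author's own statement) =====
-- stated objective: alternative
-- what changed: B sorts a copy of the input first and scans it once, grouping consecutive equal values into runs and keeping run-length-1 values, instead of A's dict counting pass followed by a filter and a sort.
import Mathlib
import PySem

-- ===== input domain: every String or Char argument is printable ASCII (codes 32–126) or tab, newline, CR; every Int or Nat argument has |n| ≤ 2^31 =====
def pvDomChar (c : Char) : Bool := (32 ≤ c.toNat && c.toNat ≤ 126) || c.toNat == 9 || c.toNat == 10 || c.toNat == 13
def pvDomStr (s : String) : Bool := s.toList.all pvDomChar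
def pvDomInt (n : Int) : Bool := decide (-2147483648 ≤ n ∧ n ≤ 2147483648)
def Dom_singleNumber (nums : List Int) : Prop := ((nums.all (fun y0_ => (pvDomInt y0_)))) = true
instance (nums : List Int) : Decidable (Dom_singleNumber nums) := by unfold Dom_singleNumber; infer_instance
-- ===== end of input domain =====

-- B sorts a copy of the input and scans it once, grouping consecutive equal values into runs and
-- keeping the values whose run has length 1, instead of A's dict counting + filter + sort (alternative algorithm).


-- ===== PORT A =====
def singleNumber (nums : List Int) : List Int :=
  let ans : List Int := []
  let mpp := nums.foldl (fun d num => d.insert num (d.getD num 0 + 1))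
    (PySem.Dict.empty : PySem.Dict Int Int)
  let ans := mpp.items.foldl (fun acc kv => if kv.2 == 1 then acc ++ [kv.1] else acc) ans
  PySem.List.sorted ans (fun x => x) false

-- ===== PORT B =====
-- the outer while loop of Source B: each step consumes one run of equal values
-- (the inner 'while j < n and s[j] == s[i]' is the takeWhile/dropWhile of the run)
def runScan : List Int → List Int
  | [] => []
  | x :: xs =>
    if (xs.takeWhile (fun y => y == x)).length = 0
    then x :: runScan (xs.dropWhile (fun y => y == x))
    else runScan (xs.dropWhile (fun y => y == x))
termination_by l => l.length
decreasing_by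
  all_goals
    simp only [List.length_cons]
    have := (List.dropWhile_sublist (p := fun y => y == x) (l := xs)).length_le
    omega

def singleNumber_alt (nums : List Int) : List Int :=
  runScan (PySem.List.sorted nums (fun x => x) false)

-- ===== PRECONDITION & SPEC =====
def Spec_singleNumber (nums : List Int) (out : List Int) : Prop := out = singleNumber_alt nums
instance (nums : List Int) (out : List Int) : Decidable (Spec_singleNumber nums out) := by unfold Spec_singleNumber; infer_instance

-- ===== CLAIM (what is proved, stated in full; the proofs are below) =====
def Claim_equal_singleNumber : Prop := ∀ (nums : List Int), Dom_singleNumber nums → Spec_singleNumber nums (singleNumber nums)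

-- ===== LEMMAS AND PROOFS =====

-- A's result is sorted(keys of the counter whose count is 1)
theorem singleNumber_eq_sorted_filter (nums : List Int) :
    singleNumber nums =
      PySem.List.sorted
        ((PySem.Set.ofList nums).filter (fun k => ((nums.count k : Int) == 1)))
        (fun x => x) false := by
  unfold singleNumber
  dsimp only
  rw [PySem.Dict.foldl_insert_getD_add_one_eq_counter,
      PySem.List.foldl_append_if (p := fun kv : Int × Int => kv.2 == 1)
        (f := fun kv : Int × Int => kv.1), PySem.Dict.items_counter]
  congr 1
  rw [List.filter_map, List.map_map]
  simp [Function.comp_def]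

-- after dropping the leading run of x's from a (·≤·)-sorted list all below x, everything left is > x
theorem dropWhile_gt (x : Int) (xs : List Int) (hxs : xs.Pairwise (· ≤ ·))
    (hall : ∀ y ∈ xs, x ≤ y) :
    ∀ z ∈ xs.dropWhile (fun y => y == x), x < z := by
  intro z hz
  have hsub := List.dropWhile_sublist (p := fun y => y == x) (l := xs)
  have hd : (xs.dropWhile (fun y => y == x)).Pairwise (· ≤ ·) := hxs.sublist hsub
  cases hcase : xs.dropWhile (fun y => y == x) with
  | nil => rw [hcase] at hz; simp at hz
  | cons y ys =>
    have hy : ((fun y => y == x) y) = false := by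
      have h0 := List.head?_dropWhile_not (fun y => y == x) xs
      rw [hcase] at h0; simpa using h0
    have hyx : y ≠ x := by simpa using hy
    have hymem : y ∈ xs := hsub.mem (by rw [hcase]; exact List.mem_cons_self)
    have hxy : x < y := lt_of_le_of_ne (hall y hymem) (Ne.symm hyx)
    rw [hcase] at hz hd
    rcases List.mem_cons.mp hz with rfl | hzys
    · exact hxy
    · exact lt_of_lt_of_le hxy ((List.pairwise_cons.mp hd).1 z hzys)

-- on a (·≤·)-sorted list, the run scan returns exactly the values of count 1, strictly increasing
theorem runScan_spec (l : List Int) (hs : l.Pairwise (· ≤ ·)) :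
    (∀ z ∈ runScan l, z ∈ l) ∧ (runScan l).Pairwise (· < ·) ∧
    (∀ v, v ∈ runScan l ↔ l.count v = 1) := by
  induction l using runScan.induct with
  | case1 => simp [runScan]
  | case2 x xs h ih =>
    have hps := List.pairwise_cons.mp hs
    have hxs := hps.2
    have hall := hps.1
    have hd := hxs.sublist (List.dropWhile_sublist (p := fun y => y == x))
    have hgt := dropWhile_gt x xs hxs hall
    obtain ⟨hsub, hpw, hmem⟩ := ih hd
    have ht0 : xs.takeWhile (fun y => y == x) = [] := List.length_eq_zero_iff.mp h
    have hxd : xs = xs.dropWhile (fun y => y == x) := by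
      conv_lhs => rw [← List.takeWhile_append_dropWhile (p := fun y => y == x) (l := xs)]
      rw [ht0]; rfl
    have hrs : runScan (x :: xs) = x :: runScan (xs.dropWhile (fun y => y == x)) := by
      rw [runScan]; simp [h]
    have hxnotd : x ∉ xs.dropWhile (fun y => y == x) := fun hc => lt_irrefl x (hgt x hc)
    refine ⟨?_, ?_, ?_⟩
    · intro z hz
      rw [hrs] at hz
      rcases List.mem_cons.mp hz with rfl | hz'
      · exact List.mem_cons_self
      · exact List.mem_cons_of_mem _ (hxd ▸ hsub z hz')
    · rw [hrs]
      exact List.pairwise_cons.mpr ⟨fun z hz => hgt z (hsub z hz), hpw⟩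
    · intro v
      rw [hrs, List.mem_cons, List.count_cons]
      by_cases hvx : v = x
      · subst hvx
        have : xs.count v = 0 := List.count_eq_zero.mpr (hxd ▸ hxnotd)
        simp [this]
      · have hiff := hmem v
        rw [← hxd] at hiff ⊢
        simp [hvx, hiff, Ne.symm hvx]
  | case3 x xs h ih =>
    have hps := List.pairwise_cons.mp hs
    have hxs := hps.2
    have hall := hps.1
    have hd := hxs.sublist (List.dropWhile_sublist (p := fun y => y == x))
    have hgt := dropWhile_gt x xs hxs hall
    obtain ⟨hsub, hpw, hmem⟩ := ih hd
    have hrs : runScan (x :: xs) = runScan (xs.dropWhile (fun y => y == x)) := by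
      rw [runScan]; simp [h]
    have hxnotd : x ∉ xs.dropWhile (fun y => y == x) := fun hc => lt_irrefl x (hgt x hc)
    have htx : ∀ y ∈ xs.takeWhile (fun y => y == x), y = x := by
      intro y hy; simpa using List.mem_takeWhile_imp hy
    have hcx : xs.count x = (xs.takeWhile (fun y => y == x)).length +
        (xs.dropWhile (fun y => y == x)).count x := by
      conv_lhs => rw [← List.takeWhile_append_dropWhile (p := fun y => y == x) (l := xs)]
      rw [List.count_append]
      congr 1
      exact List.count_eq_length.mpr (fun b hb => (htx b hb).symm)
    have hcd0 : (xs.dropWhile (fun y => y == x)).count x = 0 := List.count_eq_zero.mpr hxnotd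
    refine ⟨?_, ?_, ?_⟩
    · intro z hz
      rw [hrs] at hz
      exact List.mem_cons_of_mem _ ((List.dropWhile_sublist _).mem (hsub z hz))
    · rw [hrs]; exact hpw
    · intro v
      rw [hrs, List.count_cons]
      by_cases hvx : v = x
      · subst hvx
        constructor
        · intro hc; exact absurd (hsub v hc) hxnotd
        · intro hc
          exfalso
          simp at hc
          omega
      · have hcv : xs.count v = (xs.dropWhile (fun y => y == x)).count v := by
          conv_lhs => rw [← List.takeWhile_append_dropWhile (p := fun y => y == x) (l := xs)]
          rw [List.count_append]
          have : (xs.takeWhile (fun y => y == x)).count v = 0 :=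
            List.count_eq_zero.mpr (fun hc => hvx (htx v hc))
          omega
        rw [hcv, hmem v]
        simp [Ne.symm hvx]

-- ===== VERDICT (by name: the statement is the Claim_ definition above) =====
theorem singleNumber_spec : Claim_equal_singleNumber := by
  intro nums _
  unfold Spec_singleNumber singleNumber_alt
  rw [singleNumber_eq_sorted_filter]
  have hsorted : (PySem.List.sorted nums (fun x => x) false).Pairwise (· ≤ ·) :=
    PySem.List.sorted_pairwise nums (fun x => x)
  obtain ⟨hsub, hpw, hmem⟩ := runScan_spec _ hsorted
  have hperm := PySem.List.sorted_perm nums (fun x => x) false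
  apply PySem.List.sorted_eq_of_perm_of_pairwise_lt
  · -- Perm: both nodup, same membership
    rw [List.perm_ext_iff_of_nodup (hpw.imp fun h => ne_of_lt h)
      ((PySem.Set.nodup_ofList nums).filter _)]
    intro v
    rw [hmem v, hperm.count_eq, List.mem_filter, PySem.Set.mem_ofList]
    constructor
    · intro hc
      refine ⟨List.count_pos_iff.mp (by omega), by simpa using hc⟩
    · intro ⟨_, hc⟩
      simpa using hc
  · exact hpw
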